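-- pv_equiv track=rewrite | github.com/elebirds/saki-al | scripts/rerun_failed_eval_from_train_artifact.py | is_selected_sim_loop
-- ===== SOURCE A (Python) =====
-- from typing import Any
--
-- SELECTED_SIM_GROUPS = (
--     "sim-random-yolov8l",
--     "sim-uncertainty-yolov8l",
--     "sim-aug-rect-yolov8l",
--     "sim-aug-obb-yolov8l",
--     "sim-aug-boundary-yolov8l",
-- )
--
-- def text_value(raw: Any) -> str:
--     return str(raw or "").strip()
--
-- def is_selected_sim_loop(loop_name: str) -> bool:
--     text = text_value(loop_name)
--     for prefix in SELECTED_SIM_GROUPS: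
--         if text == prefix:
--             return True
--         if text.startswith(prefix + "-") and text[len(prefix) + 1 :].isdigit():
--             return True
--     return False
-- ===== SOURCE B (Python) =====
-- from typing import Any
--
-- SELECTED_SIM_GROUPS = (
--     "sim-random-yolov8l",
--     "sim-uncertainty-yolov8l",
--     "sim-aug-rect-yolov8l",
--     "sim-aug-obb-yolov8l",
--     "sim-aug-boundary-yolov8l",
-- )
--
-- _GROUP_SET = set(SELECTED_SIM_GROUPS)
--
-- def is_selected_sim_loop(loop_name: str) -> bool:
--     text = str(loop_name or "").strip()
--     if text in _GROUP_SET: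
--         return True
--     base, sep, suffix = text.rpartition("-")
--     return sep != "" and suffix.isdigit() and base in _GROUP_SET
-- ===== Notes on version B (the rewrite author's own statement) =====
-- stated objective: simpler
-- what changed: Instead of scanning all five group prefixes and slicing the name once per prefix, B parses the name once with rpartition at its last dash and answers with two set-membership lookups (exact name, or base with a digit suffix).
import Mathlib
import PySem

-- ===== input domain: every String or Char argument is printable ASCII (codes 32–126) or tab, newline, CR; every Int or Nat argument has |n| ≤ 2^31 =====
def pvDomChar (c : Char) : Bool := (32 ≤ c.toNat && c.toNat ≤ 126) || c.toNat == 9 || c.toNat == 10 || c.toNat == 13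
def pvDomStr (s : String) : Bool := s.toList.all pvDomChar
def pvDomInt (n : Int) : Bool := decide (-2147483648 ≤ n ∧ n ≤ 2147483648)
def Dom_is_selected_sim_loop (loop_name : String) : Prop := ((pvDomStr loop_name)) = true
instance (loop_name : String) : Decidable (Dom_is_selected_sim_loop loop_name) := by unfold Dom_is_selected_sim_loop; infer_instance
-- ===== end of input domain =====

-- B replaces A's scan over all five prefixes (with a slice per prefix) by one rpartition('-')
-- parse and two set lookups; objective: simpler. Same return value on every string.

-- ===== PORT A =====
-- module constant SELECTED_SIM_GROUPS (strings as List Char)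
def pvGroups : List (List Char) :=
  ["sim-random-yolov8l".toList, "sim-uncertainty-yolov8l".toList, "sim-aug-rect-yolov8l".toList,
   "sim-aug-obb-yolov8l".toList, "sim-aug-boundary-yolov8l".toList]

-- A's for-loop over the prefixes with its two early returns
def pvAIter (text : List Char) : List (List Char) → Bool
  | [] => false
  | p :: rest =>
    if text = p then true
    else if PySem.Chars.startswith text (p ++ ['-']) &&
            PySem.Chars.strIsdigit (PySem.List.slice text (some ((p.length : Int) + 1)) none) then true
    else pvAIter text rest

def is_selected_sim_loop (loop_name : String) : Bool :=
  pvAIter (PySem.Chars.strip loop_name.toList) pvGroups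

-- ===== PORT B =====
def pvGroupSet : PySem.Set (List Char) := PySem.Set.ofList pvGroups

-- hand port of text.rpartition('-') (exact for the single-char separator '-'):
-- some (base, suffix) splits at the LAST '-'; none means no '-' (sep == '' in Python)
def pvRPartition : List Char → Option (List Char × List Char)
  | [] => none
  | c :: rest =>
    match pvRPartition rest with
    | some (b, s) => some (c :: b, s)
    | none => if c = '-' then some ([], rest) else none

def is_selected_sim_loop_alt (loop_name : String) : Bool :=
  let text := PySem.Chars.strip loop_name.toList
  if PySem.Set.contains pvGroupSet text then true
  else
    match pvRPartition text with
    | none => false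
    | some (b, s) => PySem.Chars.strIsdigit s && PySem.Set.contains pvGroupSet b

-- ===== PRECONDITION & SPEC =====
def Spec_is_selected_sim_loop (loop_name : String) (out : Bool) : Prop := out = is_selected_sim_loop_alt loop_name
instance (loop_name : String) (out : Bool) : Decidable (Spec_is_selected_sim_loop loop_name out) := by unfold Spec_is_selected_sim_loop; infer_instance

-- ===== CLAIM (what is proved, stated in full; the proofs are below) =====
def Claim_equal_is_selected_sim_loop : Prop := ∀ (loop_name : String), Dom_is_selected_sim_loop loop_name → Spec_is_selected_sim_loop loop_name (is_selected_sim_loop loop_name)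

-- ===== LEMMAS AND PROOFS =====

-- a digit-only check rules out '-' and the empty string
theorem pv_isdigit_no_dash {s : List Char} (h : PySem.Chars.strIsdigit s = true) :
    s ≠ [] ∧ '-' ∉ s := by
  simp [PySem.Chars.strIsdigit] at h
  refine ⟨h.1, fun hm => ?_⟩
  have := h.2 '-' hm
  simp [PySem.Chars.isdigit] at this

theorem pvRPartition_eq_none {cs : List Char} (h : '-' ∉ cs) : pvRPartition cs = none := by
  induction cs with
  | nil => rfl
  | cons c rest ih =>
    simp at h
    simp [pvRPartition, ih h.2, Ne.symm h.1]

theorem pvRPartition_none {cs : List Char} (h : pvRPartition cs = none) : '-' ∉ cs := by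
  induction cs with
  | nil => simp
  | cons c rest ih =>
    simp only [pvRPartition] at h
    cases hr : pvRPartition rest with
    | some pr => obtain ⟨b, s⟩ := pr; rw [hr] at h; simp at h
    | none =>
      rw [hr] at h
      by_cases hc : c = '-'
      · rw [if_pos hc] at h
        exact absurd h (by simp)
      · simp only [List.mem_cons, not_or]
        exact ⟨fun he => hc he.symm, ih hr⟩

theorem pvRPartition_some {cs b s : List Char} (h : pvRPartition cs = some (b, s)) :
    cs = b ++ '-' :: s ∧ '-' ∉ s := by
  induction cs generalizing b s with
  | nil => simp [pvRPartition] at h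
  | cons c rest ih =>
    simp only [pvRPartition] at h
    cases hr : pvRPartition rest with
    | some pr =>
      obtain ⟨b', s'⟩ := pr
      rw [hr] at h
      simp only [Option.some.injEq, Prod.mk.injEq] at h
      obtain ⟨hb, hs⟩ := h
      obtain ⟨hrest, hns⟩ := ih hr
      subst hb; subst hs
      simp [hrest, hns]
    | none =>
      rw [hr] at h
      by_cases hc : c = '-'
      · rw [if_pos hc] at h
        simp only [Option.some.injEq, Prod.mk.injEq] at h
        obtain ⟨hb, hs⟩ := h
        subst hb; subst hs
        exact ⟨by simp [hc], pvRPartition_none hr⟩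
      · rw [if_neg hc] at h
        exact absurd h (by simp)

theorem pvRPartition_split {b s : List Char} (hs : '-' ∉ s) :
    pvRPartition (b ++ '-' :: s) = some (b, s) := by
  induction b with
  | nil => simp [pvRPartition, pvRPartition_eq_none hs]
  | cons c b ih => simp [pvRPartition, ih]

-- A's per-prefix clause, characterised
theorem pv_clause_iff (p text : List Char) :
    (PySem.Chars.startswith text (p ++ ['-']) &&
      PySem.Chars.strIsdigit (PySem.List.slice text (some ((p.length : Int) + 1)) none)) = true ↔
    ∃ s, text = p ++ '-' :: s ∧ PySem.Chars.strIsdigit s = true := by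
  rw [Bool.and_eq_true, PySem.Chars.startswith_iff]
  have hcast : ((p.length : Int) + 1) = ((p.length + 1 : Nat) : Int) := by push_cast; ring
  constructor
  · rintro ⟨⟨t, rfl⟩, hd⟩
    refine ⟨t, by simp, ?_⟩
    rw [hcast, PySem.List.slice_from_natCast] at hd
    simpa using hd
  · rintro ⟨s, rfl, hd⟩
    rw [hcast, PySem.List.slice_from_natCast]
    exact ⟨⟨s, by simp⟩, by simpa using hd⟩

theorem pvAIter_true_iff (text : List Char) (ps : List (List Char)) :
    pvAIter text ps = true ↔
    ∃ p ∈ ps, text = p ∨ (∃ s, text = p ++ '-' :: s ∧ PySem.Chars.strIsdigit s = true) := by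
  induction ps with
  | nil => simp [pvAIter]
  | cons p rest ih =>
    simp only [pvAIter]
    by_cases h1 : text = p
    · rw [if_pos h1]
      exact ⟨fun _ => ⟨p, by simp, Or.inl h1⟩, fun _ => rfl⟩
    · rw [if_neg h1]
      by_cases h2 : (PySem.Chars.startswith text (p ++ ['-']) &&
          PySem.Chars.strIsdigit (PySem.List.slice text (some ((p.length : Int) + 1)) none)) = true
      · rw [if_pos h2]
        exact ⟨fun _ => ⟨p, by simp, Or.inr ((pv_clause_iff p text).mp h2)⟩, fun _ => rfl⟩
      · rw [if_neg h2, ih]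
        constructor
        · rintro ⟨q, hq, hh⟩; exact ⟨q, List.mem_cons_of_mem _ hq, hh⟩
        · rintro ⟨q, hq, hh⟩
          rcases List.mem_cons.mp hq with rfl | hq'
          · rcases hh with rfl | hh
            · exact absurd rfl h1
            · exact absurd ((pv_clause_iff q text).mpr hh) h2
          · exact ⟨q, hq', hh⟩

theorem pv_contains_iff (x : List Char) :
    PySem.Set.contains pvGroupSet x = true ↔ x ∈ pvGroups := by
  simp only [pvGroupSet, PySem.Set.contains, List.contains_iff_mem]
  exact PySem.Set.mem_ofList _ _

-- the core equivalence, on the stripped text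
theorem pv_core (text : List Char) :
    pvAIter text pvGroups =
      (if PySem.Set.contains pvGroupSet text then true
       else
         match pvRPartition text with
         | none => false
         | some (b, s) => PySem.Chars.strIsdigit s && PySem.Set.contains pvGroupSet b) := by
  by_cases hmem : PySem.Set.contains pvGroupSet text = true
  · rw [if_pos hmem, pvAIter_true_iff]
    exact ⟨text, (pv_contains_iff text).mp hmem, Or.inl rfl⟩
  · rw [if_neg hmem]
    cases hrp : pvRPartition text with
    | none =>
      show pvAIter text pvGroups = false
      rw [Bool.eq_false_iff, Ne, pvAIter_true_iff]
      rintro ⟨q, hq, heq | ⟨s, heq, hd⟩⟩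
      · exact hmem ((pv_contains_iff _).mpr (heq ▸ hq))
      · have h2 := pvRPartition_split (b := q) (s := s) (pv_isdigit_no_dash hd).2
        rw [← heq, hrp] at h2
        simp at h2
    | some pr =>
      obtain ⟨b, s⟩ := pr
      obtain ⟨htext, hns⟩ := pvRPartition_some hrp
      show pvAIter text pvGroups = (PySem.Chars.strIsdigit s && PySem.Set.contains pvGroupSet b)
      cases hbs : (PySem.Chars.strIsdigit s && PySem.Set.contains pvGroupSet b) with
      | true =>
        rw [Bool.and_eq_true] at hbs
        rw [pvAIter_true_iff]
        exact ⟨b, (pv_contains_iff b).mp hbs.2, Or.inr ⟨s, htext, hbs.1⟩⟩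
      | false =>
        rw [Bool.eq_false_iff, Ne, pvAIter_true_iff]
        rintro ⟨q, hq, heq | ⟨s', heq, hd⟩⟩
        · exact hmem ((pv_contains_iff _).mpr (heq ▸ hq))
        · have h2 := pvRPartition_split (b := q) (s := s') (pv_isdigit_no_dash hd).2
          rw [← heq, hrp] at h2
          obtain ⟨rfl, rfl⟩ : b = q ∧ s = s' := by
            simpa [Prod.ext_iff] using (Option.some.inj h2)
          simp [hd] at hbs
          exact hbs (by simpa [pvGroupSet] using (PySem.Set.mem_ofList pvGroups b).mpr hq)

-- ===== VERDICT (by name: the statement is the Claim_ definition above) =====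
theorem is_selected_sim_loop_spec : Claim_equal_is_selected_sim_loop := by
  intro loop_name _
  unfold Spec_is_selected_sim_loop is_selected_sim_loop is_selected_sim_loop_alt
  exact pv_core _
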